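-- pv_equiv track=rewrite | github.com/bigpe/Ecole42_RainFall | utils/base.py | address_to_string
-- ===== SOURCE A (Python) =====
-- def address_to_string(address):
--     if isinstance(address, bytes):
--         address = str(address)
--     if ' ' in address:
--         address = address.split(' ')[1]
--     address = address.replace("'", '')
--     address = address[2:]
--     address = address[::-1]
--     res = []
--     for i, x in enumerate(address):
--         if not i % 2:
--             if len(address) > i + 1:
--                 res.append(f'\\x{address[i + 1]}{x}')
--             else:
--                 res.append(f'\\x0{x}')
--     return ''.join(res)
-- ===== SOURCE B (Python) =====
-- def address_to_string(address):
--     if isinstance(address, bytes):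
--         address = str(address)
--     if ' ' in address:
--         address = address.split(' ')[1]
--     address = address.replace("'", '')
--     s = address[2:]
--     if len(s) % 2:
--         s = '0' + s
--     out = []
--     while s:
--         out.append('\\x' + s[-2:])
--         s = s[:-2]
--     return ''.join(out)
-- ===== Notes on version B (the rewrite author's own statement) =====
-- stated objective: simpler
-- what changed: Instead of reversing the whole cleaned hex string and re-pairing characters at even enumerate indices with in-bounds/last-character case analysis, B left-pads the cleaned string with one zero digit when its length is odd and then repeatedly chops the last two characters off as a backslash-x byte chunk, with no index or parity bookkeeping.
import Mathlib
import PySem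

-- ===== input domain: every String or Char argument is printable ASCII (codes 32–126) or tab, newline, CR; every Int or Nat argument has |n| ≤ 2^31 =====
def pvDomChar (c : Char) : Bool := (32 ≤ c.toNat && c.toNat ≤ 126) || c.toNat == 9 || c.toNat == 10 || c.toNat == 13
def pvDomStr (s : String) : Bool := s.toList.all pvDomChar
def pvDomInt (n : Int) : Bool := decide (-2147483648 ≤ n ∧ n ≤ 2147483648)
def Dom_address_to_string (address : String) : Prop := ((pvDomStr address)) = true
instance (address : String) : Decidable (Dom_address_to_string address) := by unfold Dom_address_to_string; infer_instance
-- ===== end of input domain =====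

-- B chops two-character byte chunks off the END of the (left-'0'-padded) cleaned hex string,
-- instead of reversing the whole string and re-pairing characters at even indices: simpler (one
-- padding step plus a plain chop loop, no index parity bookkeeping). Return-value equivalence only.

-- ===== PORT A =====
-- Preprocessing lines shared VERBATIM by both Pythons (isinstance(address, bytes) is False for a
-- str argument, so that branch is dead under the String type convention):
--   if ' ' in address: address = address.split(' ')[1]     (index 1 in range: the split has ≥ 2 parts)
--   address = address.replace("'", ''); address = address[2:]
def pvClean (address : String) : List Char :=
  let a0 := address.toList
  let a1 := if PySem.Chars.isIn [' '] a0 then (PySem.Chars.splitOn a0 [' ']).getD 1 [] else a0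
  let a2 := PySem.Chars.replace a1 ['\''] []
  PySem.List.slice a2 (some 2) none

-- A's loop body: for i, x in enumerate(address): if not i % 2: …
-- (address[i + 1] is guarded in range by 'len(address) > i + 1' and i + 1 ≥ 0, so pyGetD is exact)
def pvStepA (r : List Char) (res : List (List Char)) (p : Int × Char) : List (List Char) :=
  if PySem.Int.mod p.1 2 == 0 then
    res ++ [if (r.length : Int) > p.1 + 1 then ['\\', 'x', PySem.List.pyGetD r (p.1 + 1) ' ', p.2]
            else ['\\', 'x', '0', p.2]]
  else res

def address_to_string (address : String) : String :=
  let a3 := pvClean address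
  let r := (PySem.List.slice? a3 none none (-1)).getD []   -- address[::-1]
  String.ofList (PySem.Chars.join [] ((PySem.List.enumerate r 0).foldl (pvStepA r) []))

-- ===== PORT B =====
-- B's while loop: while s: out.append('\\x' + s[-2:]); s = s[:-2]
def pvLoopB (s : List Char) : List (List Char) :=
  if s = [] then []
  else (['\\', 'x'] ++ PySem.List.slice s (some (-2)) none) :: pvLoopB (PySem.List.slice s none (some (-2)))
termination_by s.length
decreasing_by
  rename_i h
  rw [PySem.List.slice_to_neg_ofNat s 2 (by omega)]
  have : s.length ≠ 0 := fun h0 => h (List.eq_nil_of_length_eq_zero h0)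
  simp only [List.length_take]
  omega

def address_to_string_alt (address : String) : String :=
  let s0 := pvClean address
  let s := if s0.length % 2 == 1 then '0' :: s0 else s0   -- if len(s) % 2: s = '0' + s
  String.ofList (PySem.Chars.join [] (pvLoopB s))

-- ===== PRECONDITION & SPEC =====
def Spec_address_to_string (address : String) (out : String) : Prop := out = address_to_string_alt address
instance (address : String) (out : String) : Decidable (Spec_address_to_string address out) := by unfold Spec_address_to_string; infer_instance

-- ===== CLAIM (what is proved, stated in full; the proofs are below) =====
def Claim_equal_address_to_string : Prop := ∀ (address : String), Dom_address_to_string address → Spec_address_to_string address (address_to_string address)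

-- ===== LEMMAS AND PROOFS =====

-- The common value both loops compute from the reversed cleaned string: consume it in pairs,
-- a trailing lone character getting a '0' as its high nibble.
def pvPairs : List Char → List (List Char)
  | [] => []
  | [x] => [['\\', 'x', '0', x]]
  | a :: b :: t => ['\\', 'x', b, a] :: pvPairs t

lemma pvModCast (k : Nat) : PySem.Int.mod (k : Int) 2 = ((k % 2 : Nat) : Int) := by
  exact_mod_cast PySem.Int.mod_natCast k 2

-- A's enumerate-fold over a suffix of r starting at an even index k yields pvPairs of that suffix.
lemma pvLemA : ∀ (t r : List Char) (k : Nat) (acc : List (List Char)),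
    r.drop k = t → k % 2 = 0 →
    (PySem.List.enumerate t (k : Int)).foldl (pvStepA r) acc = acc ++ pvPairs t := by
  intro t
  induction t using pvPairs.induct with
  | case1 =>
    intro r k acc _ _
    simp [PySem.List.enumerate, pvPairs]
  | case2 x =>
    intro r k acc hd hk
    have hlen : r.length = k + 1 := by
      have := congrArg List.length hd
      simp only [List.length_drop, List.length_cons, List.length_nil] at this
      omega
    rw [PySem.List.enumerate_cons, PySem.List.enumerate_nil]
    simp only [List.foldl_cons, List.foldl_nil, pvStepA, pvModCast k, hk]
    have hnotgt : ¬ ((r.length : Int) > (k : Int) + 1) := by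
      rw [hlen]; push_cast; omega
    simp [hnotgt, pvPairs]
  | case3 a b t' ih =>
    intro r k acc hd hk
    have hlen : r.length = k + t'.length + 2 := by
      have := congrArg List.length hd
      simp only [List.length_drop, List.length_cons] at this
      omega
    have hb : r.getD (k + 1) ' ' = b := by
      have h1 : r[k + 1]? = (r.drop k)[1]? := by
        rw [List.getElem?_drop]
      rw [hd] at h1
      simp [List.getD_eq_getElem?_getD, h1]
    have hd' : r.drop (k + 2) = t' := by
      have : r.drop (k + 2) = (r.drop k).drop 2 := by
        rw [List.drop_drop]
      rw [this, hd]; rfl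
    rw [PySem.List.enumerate_cons, PySem.List.enumerate_cons]
    simp only [List.foldl_cons]
    have hstep1 : pvStepA r acc ((k : Int), a) = acc ++ [['\\', 'x', b, a]] := by
      simp only [pvStepA, pvModCast k, hk]
      have hgt : (r.length : Int) > (k : Int) + 1 := by rw [hlen]; push_cast; omega
      have hget : PySem.List.pyGetD r ((k : Int) + 1) ' ' = b := by
        have := PySem.List.pyGetD_natCast r (k + 1) ' '
        push_cast at this
        rw [this, hb]
      simp [hgt, hget]
    have hstep2 : pvStepA (r := r) (acc ++ [['\\', 'x', b, a]]) ((k : Int) + 1, b)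
        = acc ++ [['\\', 'x', b, a]] := by
      simp only [pvStepA]
      have : PySem.Int.mod ((k : Int) + 1) 2 = (((k + 1) % 2 : Nat) : Int) := by
        have := pvModCast (k + 1); push_cast at this ⊢; exact this
      rw [this]
      have : (k + 1) % 2 = 1 := by omega
      simp [this]
    rw [hstep1, hstep2]
    have hcast : (k : Int) + 1 + 1 = ((k + 2 : Nat) : Int) := by push_cast; ring
    rw [hcast, ih r (k + 2) _ hd' (by omega)]
    simp [pvPairs]

lemma pvLemA0 (r : List Char) :
    (PySem.List.enumerate r 0).foldl (pvStepA r) [] = pvPairs r := by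
  have := pvLemA r r 0 [] (by simp) rfl
  simpa using this

-- B's chop-from-the-end loop on an even-length string is pvPairs of its reverse.
lemma pvLemB : ∀ (n : Nat) (s : List Char), s.length = n → n % 2 = 0 →
    pvLoopB s = pvPairs s.reverse := by
  intro n
  induction n using Nat.strong_induction_on with
  | _ n ih =>
    intro s hn hpar
    rcases hrev : s.reverse with _ | ⟨a, tl⟩
    · have hsnil : s = [] := by simpa using congrArg List.reverse hrev
      subst hsnil; rw [pvLoopB]; simp [pvPairs]
    · rcases tl with _ | ⟨b, w⟩
      · exfalso
        have h1 : s.length = 1 := by simpa using congrArg List.length hrev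
        omega
      · have hs : s = w.reverse ++ [b, a] := by simpa using congrArg List.reverse hrev
        have hnil : s ≠ [] := by rw [hs]; simp
        have hlen2 : 2 ≤ s.length := by rw [hs]; simp
        have hlenu : s.length - 2 = w.reverse.length := by rw [hs]; simp
        rw [pvLoopB, if_neg hnil,
            PySem.List.slice_from_neg_ofNat s 2 (by omega),
            PySem.List.slice_to_neg_ofNat s 2 (by omega), hlenu, hs,
            List.drop_left, List.take_left,
            ih (n - 2) (by omega) w.reverse
              (by have := congrArg List.length hs; simp at this; omega) (by omega)]
        simp [pvPairs]

lemma pvOddPad : ∀ (l : List Char), l.length % 2 = 1 → pvPairs (l ++ ['0']) = pvPairs l := by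
  intro l
  induction l using pvPairs.induct with
  | case1 => intro h; simp at h
  | case2 x => intro _; rfl
  | case3 a b t ih =>
    intro h
    simp only [List.length_cons] at h
    simp only [List.cons_append, pvPairs]
    rw [ih (by omega)]

-- core equality, for the cleaned character list s0
lemma pvCore (s0 : List Char) :
    (PySem.List.enumerate s0.reverse 0).foldl (pvStepA s0.reverse) []
      = pvLoopB (if s0.length % 2 == 1 then '0' :: s0 else s0) := by
  rw [pvLemA0]
  by_cases hpar : s0.length % 2 = 1
  · simp only [hpar, beq_self_eq_true, if_true]
    rw [pvLemB ('0' :: s0).length ('0' :: s0) rfl (by simp [List.length_cons]; omega)]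
    rw [List.reverse_cons, pvOddPad s0.reverse (by simp [hpar])]
  · have : (s0.length % 2 == 1) = false := by simp [hpar]
    rw [this, if_neg (by simp)]
    rw [pvLemB s0.length s0 rfl (by omega)]

-- ===== VERDICT (by name: the statement is the Claim_ definition above) =====
theorem address_to_string_spec : Claim_equal_address_to_string := by
  intro address _
  unfold Spec_address_to_string address_to_string address_to_string_alt
  simp only [PySem.List.slice?_none_none_neg_one, Option.getD_some]
  rw [pvCore (pvClean address)]
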